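-- pv_equiv track=rewrite | github.com/CH4MD0M/Algorithm | Programmers/Level2/[1차]프렌즈4블록/[1차]프렌즈4블록.py | solution
-- ===== SOURCE A (Python) =====
-- def solution(m, n, board):
--     answer = 0
--     board = [list(i) for i in board]
--
--     while True:
--         check = [[0 for c in range(n)] for r in range(m)]
--         # 블럭 찾기
--         for i in range(m - 1):
--             for j in range(n - 1):
--                 if board[i][j] != 0 and board[i][j] == board[i][j+1] == board[i+1][j] == board[i+1][j+1]:
--                     check[i][j], check[i][j+1], check[i+1][j], check[i+1][j+1] = 1, 1, 1, 1
--
--         # 제거한 블럭 count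
--         count = 0
--         for i in range(m):
--             count += sum(check[i])
--         if count == 0:
--             break
--         answer += count
--
--         # 블럭 이동
--         for i in range(m-1, -1, -1):
--             for j in range(n):
--                 if check[i][j] == 1:
--                     x = i-1
--                     while x >= 0 and check[x][j] == 1:
--                         x -= 1
--                     if x < 0:
--                         board[i][j] = 0
--                     else:
--                         board[i][j] = board[x][j]
--                         check[x][j] = 1
--     return answer
-- ===== SOURCE B (Python) =====
-- def solution(m, n, board):
--     answer = 0
--     board = [list(row) for row in board]
--
--     while True:
--         # find all cells belonging to some 2x2 same-colour block
--         remove = set()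
--         for i in range(m - 1):
--             for j in range(n - 1):
--                 v = board[i][j]
--                 if v != 0 and v == board[i][j + 1] == board[i + 1][j] == board[i + 1][j + 1]:
--                     remove |= {(i, j), (i, j + 1), (i + 1, j), (i + 1, j + 1)}
--         if not remove:
--             break
--         answer += len(remove)
--
--         # gravity: per column, keep the survivors in order, pad zeros on top
--         for j in range(n):
--             survivors = [board[i][j] for i in range(m) if (i, j) not in remove]
--             pad = m - len(survivors)
--             for i in range(m):
--                 board[i][j] = 0 if i < pad else survivors[i - pad]
--     return answer
-- ===== Notes on version B (the rewrite author's own statement) =====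
-- stated objective: simpler
-- what changed: B tracks removed cells as a set of coordinates instead of a 0/1 check matrix (count = len(set)) and replaces A's per-cell bottom-up pull-down gravity, which reuses the check matrix as a consumed-marker and rescans upward for each removed cell, with a per-column filter-and-pad pass (keep survivors in order, pad zeros on top).
-- outside the precondition, e.g. on solution(2, 2, ['ab', 'c']): A returns 0, B returns 0
import Mathlib
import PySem

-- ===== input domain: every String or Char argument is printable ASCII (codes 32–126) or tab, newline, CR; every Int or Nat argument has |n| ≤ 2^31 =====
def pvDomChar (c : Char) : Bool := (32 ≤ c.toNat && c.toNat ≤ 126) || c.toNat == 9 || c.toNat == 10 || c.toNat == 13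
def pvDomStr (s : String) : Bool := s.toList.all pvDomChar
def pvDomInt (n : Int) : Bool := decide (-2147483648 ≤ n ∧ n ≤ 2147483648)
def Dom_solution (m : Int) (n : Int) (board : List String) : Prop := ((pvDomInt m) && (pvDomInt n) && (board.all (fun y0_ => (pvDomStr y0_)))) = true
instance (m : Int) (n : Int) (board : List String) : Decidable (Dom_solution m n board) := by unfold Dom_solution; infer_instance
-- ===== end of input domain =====

-- B replaces A's per-cell pull-down gravity (which reuses `check` as a consumed marker)
-- by a per-column filter-and-pad pass, and tracks removed cells as a set of coordinates
-- instead of a 0/1 matrix; objective: simpler.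
-- Return-value equivalence only: A mutates no caller-visible data (it rebinds `board` locally).

-- ===== PORT A =====

-- board = [list(i) for i in board]  (cells as character codes; 0 marks an emptied cell)
def pvToGrid (board : List String) : List (List Int) :=
  board.map (fun s => s.toList.map (fun ch => (ch.toNat : Int)))

-- board[i][j] (indices are produced by range(...) and are in range under Pre_)
def pvGet (g : List (List Int)) (i j : Int) : Int :=
  (g.getD i.toNat []).getD j.toNat 0

-- board[i][j] = v
def pvSet (g : List (List Int)) (i j : Int) (v : Int) : List (List Int) :=
  g.modify i.toNat (fun row => row.set j.toNat v)

-- the body of the 2x2 scan at (i, j)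
def pvMarkA (g c : List (List Int)) (i j : Int) : List (List Int) :=
  let v := pvGet g i j
  if v ≠ 0 ∧ v = pvGet g i (j+1) ∧ pvGet g i (j+1) = pvGet g (i+1) j ∧
      pvGet g (i+1) j = pvGet g (i+1) (j+1) then
    pvSet (pvSet (pvSet (pvSet c i j 1) i (j+1) 1) (i+1) j 1) (i+1) (j+1) 1
  else c

-- check = [[0]*n for _ in range(m)]; double loop marking 2x2 blocks
def pvCheckA (m n : Int) (g : List (List Int)) : List (List Int) :=
  (PySem.List.pyRange 0 (m-1) 1).foldl (fun c i =>
      (PySem.List.pyRange 0 (n-1) 1).foldl (fun c j => pvMarkA g c i j) c)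
    ((PySem.List.pyRange 0 m 1).map (fun _ => (PySem.List.pyRange 0 n 1).map (fun _ => (0:Int))))

-- count = 0; for i in range(m): count += sum(check[i])
def pvCountA (m : Int) (c : List (List Int)) : Int :=
  (PySem.List.pyRange 0 m 1).foldl (fun acc i => acc + (c.getD i.toNat []).sum) 0

-- x = i-1; while x >= 0 and check[x][j] == 1: x -= 1
def pvFindUp (c : List (List Int)) (j : Int) (x : Int) : Int :=
  if h : 0 ≤ x ∧ pvGet c x j = 1 then pvFindUp c j (x - 1) else x
termination_by (x + 1).toNat
decreasing_by obtain ⟨h1, _⟩ := h; omega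

-- the body of the gravity loop at (i, j), acting on the pair (board, check)
def pvFallA (i j : Int) (s : List (List Int) × List (List Int)) :
    List (List Int) × List (List Int) :=
  if pvGet s.2 i j = 1 then
    let x := pvFindUp s.2 j (i - 1)
    if x < 0 then (pvSet s.1 i j 0, s.2)
    else (pvSet s.1 i j (pvGet s.1 x j), pvSet s.2 x j 1)
  else s

-- for i in range(m-1, -1, -1): for j in range(n): ...
def pvGravA (m n : Int) (g c : List (List Int)) : List (List Int) :=
  ((PySem.List.pyRange (m-1) (-1) (-1)).foldl (fun s i =>
      (PySem.List.pyRange 0 n 1).foldl (fun s j => pvFallA i j s) s) (g, c)).1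

-- while True: ... (fuel bounds the rounds; every continuing round removes at least one cell,
-- so m*n+1 rounds are never exhausted on inputs satisfying Pre_)
def pvLoopA (m n : Int) : Nat → List (List Int) → Int → Int
  | 0, _, ans => ans
  | fuel + 1, g, ans =>
    let c := pvCheckA m n g
    let cnt := pvCountA m c
    if cnt = 0 then ans else pvLoopA m n fuel (pvGravA m n g c) (ans + cnt)

def solution (m : Int) (n : Int) (board : List String) : Int :=
  pvLoopA m n (m.toNat * n.toNat + 1) (pvToGrid board) 0

-- ===== PORT B =====

-- the body of B's 2x2 scan: record the four coordinates in the `remove` set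
def pvMarkB (g : List (List Int)) (s : PySem.Set (Int × Int)) (i j : Int) :
    PySem.Set (Int × Int) :=
  let v := pvGet g i j
  if v ≠ 0 ∧ v = pvGet g i (j+1) ∧ pvGet g i (j+1) = pvGet g (i+1) j ∧
      pvGet g (i+1) j = pvGet g (i+1) (j+1) then
    PySem.Set.add (PySem.Set.add (PySem.Set.add (PySem.Set.add s (i, j)) (i, j+1)) (i+1, j)) (i+1, j+1)
  else s

-- remove = set(); double loop collecting the cells of 2x2 blocks
def pvRemoveB (m n : Int) (g : List (List Int)) : PySem.Set (Int × Int) :=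
  (PySem.List.pyRange 0 (m-1) 1).foldl (fun s i =>
      (PySem.List.pyRange 0 (n-1) 1).foldl (fun s j => pvMarkB g s i j) s)
    PySem.Set.empty

-- survivors = [board[i][j] for i in range(m) if (i, j) not in remove];
-- pad = m - len(survivors); for i in range(m): board[i][j] = 0 if i < pad else survivors[i-pad]
def pvDropCol (m : Int) (rm : PySem.Set (Int × Int)) (g : List (List Int)) (j : Int) :
    List (List Int) :=
  let survivors := (PySem.List.pyRange 0 m 1).foldl
      (fun acc i => if PySem.Set.contains rm (i, j) then acc else acc ++ [pvGet g i j]) []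
  let pad : Int := m - survivors.length
  (PySem.List.pyRange 0 m 1).foldl
    (fun g i => pvSet g i j (if i < pad then 0 else survivors.getD (i - pad).toNat 0)) g

-- for j in range(n): drop column j
def pvGravB (m n : Int) (rm : PySem.Set (Int × Int)) (g : List (List Int)) :
    List (List Int) :=
  (PySem.List.pyRange 0 n 1).foldl (fun g j => pvDropCol m rm g j) g

def pvLoopB (m n : Int) : Nat → List (List Int) → Int → Int
  | 0, _, ans => ans
  | fuel + 1, g, ans =>
    let rm := pvRemoveB m n g
    if rm.length = 0 then ans
    else pvLoopB m n fuel (pvGravB m n rm g) (ans + (rm.length : Int))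

def solution_alt (m : Int) (n : Int) (board : List String) : Int :=
  pvLoopB m n (m.toNat * n.toNat + 1) (pvToGrid board) 0

-- ===== PRECONDITION & SPEC =====
-- Pre_ is the natural domain: either the board is degenerate (m <= 1 or n <= 1; A touches
-- no cell and returns 0) or the first m rows really form an m x n board (m <= len(board),
-- each of the first m rows at least n long).  Outside it A usually raises IndexError, but
-- A may accidentally return 0 on a ragged board when the short-circuit of the chained
-- comparison skips the out-of-range access; Pre_ excludes those accidental returns.
def Pre_solution (m : Int) (n : Int) (board : List String) : Prop :=
  m ≤ 1 ∨ n ≤ 1 ∨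
    (m ≤ (board.length : Int) ∧ ∀ s ∈ board.take m.toNat, n ≤ PySem.Str.len s)
instance (m : Int) (n : Int) (board : List String) : Decidable (Pre_solution m n board) := by
  unfold Pre_solution; infer_instance

def pvWitness_solution : Int × Int × List String := (2, 3, ["aab", "aab"])

def Spec_solution (m : Int) (n : Int) (board : List String) (out : Int) : Prop := out = solution_alt m n board
instance (m : Int) (n : Int) (board : List String) (out : Int) : Decidable (Spec_solution m n board out) := by unfold Spec_solution; infer_instance

-- ===== CLAIM (what is proved, stated in full; the proofs are below) =====
def Claim_equal_solution : Prop := ∀ (m : Int) (n : Int) (board : List String), Dom_solution m n board → Pre_solution m n board → Spec_solution m n board (solution m n board)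

-- ===== LEMMAS AND PROOFS =====


def pvColFind (q : List Int) (x : Int) : Int :=
  if h : 0 ≤ x ∧ q.getD x.toNat 0 = 1 then pvColFind q (x - 1) else x
termination_by (x + 1).toNat
decreasing_by obtain ⟨h1, _⟩ := h; omega

def pvColFall (i : Int) (p : List Int × List Int) : List Int × List Int :=
  if p.2.getD i.toNat 0 = 1 then
    let x := pvColFind p.2 (i - 1)
    if x < 0 then (p.1.set i.toNat 0, p.2)
    else (p.1.set i.toNat (p.1.getD x.toNat 0), p.2.set x.toNat 1)
  else p

def pvColRun : Nat → List Int × List Int → List Int × List Int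
  | 0, p => p
  | k+1, p => pvColRun k (pvColFall (k : Int) p)

def pvKeep (b q : List Int) : List Int :=
  (b.zip q).filterMap (fun p => if p.2 = 1 then none else some p.1)

lemma pvGetD_concat (l : List Int) (a d : Int) : (l ++ [a]).getD l.length d = a := by
  rw [List.getD_eq_getElem]
  · exact List.getElem_concat_length rfl _
  · simp

lemma pvColFind_le (q : List Int) (x : Int) : pvColFind q x ≤ x := by
  fun_induction pvColFind with
  | case1 x h ih => omega
  | case2 x h => omega

lemma pvColFind_stop (q : List Int) (x : Int)
    (h : ¬(0 ≤ x ∧ q.getD x.toNat 0 = 1)) : pvColFind q x = x := by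
  rw [pvColFind, dif_neg h]

lemma pvColFind_step (q : List Int) (x : Int)
    (h : 0 ≤ x ∧ q.getD x.toNat 0 = 1) : pvColFind q x = pvColFind q (x - 1) := by
  conv_lhs => rw [pvColFind]
  rw [dif_pos h]

lemma pvColFind_append (q r : List Int) : ∀ (x : Int), x < q.length →
    pvColFind (q ++ r) x = pvColFind q x := by
  intro x
  induction hn : (x + 1).toNat using Nat.strong_induction_on generalizing x with
  | _ n ih =>
    intro hx
    subst hn
    by_cases h0 : 0 ≤ x
    · have hget : (q ++ r).getD x.toNat 0 = q.getD x.toNat 0 :=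
        List.getD_append _ _ _ _ (by omega)
      by_cases hc : q.getD x.toNat 0 = 1
      · have e1 : pvColFind (q ++ r) x = pvColFind (q ++ r) (x - 1) := by
          conv_lhs => rw [pvColFind]
          rw [dif_pos ⟨h0, by rwa [hget]⟩]
        have e2 : pvColFind q x = pvColFind q (x - 1) := by
          conv_lhs => rw [pvColFind]
          rw [dif_pos ⟨h0, hc⟩]
        rw [e1, e2]
        refine ih ((x - 1) + 1).toNat (by omega) (x - 1) ?_ ?_ <;> omega
      · have e1 : pvColFind (q ++ r) x = x := by
          conv_lhs => rw [pvColFind]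
          rw [dif_neg (by rw [hget]; tauto)]
        have e2 : pvColFind q x = x := by
          conv_lhs => rw [pvColFind]
          rw [dif_neg (by tauto)]
        rw [e1, e2]
    · have e1 : pvColFind (q ++ r) x = x := by
        conv_lhs => rw [pvColFind]
        rw [dif_neg (by tauto)]
      have e2 : pvColFind q x = x := by
        conv_lhs => rw [pvColFind]
        rw [dif_neg (by tauto)]
      rw [e1, e2]

lemma pvColFind_last (q : List Int) (h01 : ∀ e ∈ q, e = 0 ∨ e = 1) :
    (pvColFind q ((q.length : Int) - 1) = -1 ∧ ∀ e ∈ q, e = 1) ∨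
    (∃ u w, q = u ++ 0 :: w ∧ (∀ e ∈ w, e = 1) ∧
      pvColFind q ((q.length : Int) - 1) = u.length) := by
  induction q using List.reverseRecOn with
  | nil =>
    left
    refine ⟨?_, by simp⟩
    rw [pvColFind_stop _ _ (by simp)]
    simp
  | append_singleton r e ihr =>
    have he : e = 0 ∨ e = 1 := h01 e (by simp)
    rcases he with he | he
    · right
      refine ⟨r, [], by simp [he], by simp, ?_⟩
      subst he
      rw [pvColFind_stop]
      · simp
      · rintro ⟨-, hcon⟩
        rw [show ((((r ++ [(0:Int)]).length : Int)) - 1).toNat = r.length by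
            simp, pvGetD_concat] at hcon
        exact absurd hcon (by norm_num)
    · have hx : pvColFind (r ++ [e]) ((r.length : Int) + 1 - 1) =
          pvColFind r ((r.length : Int) - 1) := by
        conv_lhs => rw [pvColFind]
        rw [dif_pos]
        · rw [show (r.length : Int) + 1 - 1 - 1 = (r.length : Int) - 1 by ring]
          exact pvColFind_append r [e] _ (by omega)
        · constructor
          · omega
          · have : ((r.length : Int) + 1 - 1).toNat = r.length := by omega
            rw [this, pvGetD_concat]
            exact he
      rcases ihr (fun e' he' => h01 e' (by simp [he'])) with ⟨hv, hall⟩ | ⟨u, w, hq, hw, hv⟩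
      · left
        constructor
        · simp only [List.length_append, List.length_cons, List.length_nil]
          push_cast
          rw [hx]; exact hv
        · intro e' he'
          rcases List.mem_append.mp he' with h | h
          · exact hall _ h
          · simp at h; omega
      · right
        refine ⟨u, w ++ [e], by simp [hq], ?_, ?_⟩
        · intro e' he'
          rcases List.mem_append.mp he' with h | h
          · exact hw _ h
          · simp at h; omega
        · simp only [List.length_append, List.length_cons, List.length_nil]
          push_cast
          rw [hx]; exact hv

lemma pvKeep_append (xs ys us vs : List Int) (h : xs.length = us.length) :
    pvKeep (xs ++ ys) (us ++ vs) = pvKeep xs us ++ pvKeep ys vs := by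
  unfold pvKeep
  rw [List.zip_append h, List.filterMap_append]

lemma pvKeep_all_one (b q : List Int) (hall : ∀ e ∈ q, e = 1) : pvKeep b q = [] := by
  unfold pvKeep
  rw [List.filterMap_eq_nil_iff]
  intro p hp
  have : p.2 ∈ q := List.of_mem_zip hp |>.2
  simp [hall _ this]

lemma pvKeep_length_le (b q : List Int) : (pvKeep b q).length ≤ b.length := by
  calc (pvKeep b q).length ≤ (b.zip q).length := List.length_filterMap_le _ _
  _ ≤ b.length := by rw [List.length_zip]; omega

lemma pvColFall_lengths (i : Int) (p : List Int × List Int) :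
    (pvColFall i p).1.length = p.1.length ∧ (pvColFall i p).2.length = p.2.length := by
  unfold pvColFall
  dsimp only
  split
  · split <;> simp
  · simp

lemma pvColFall_append (i : Int) (b q : List Int) (v f : Int)
    (h0 : 0 ≤ i) (hi : i < b.length) (hlen : b.length = q.length) :
    pvColFall i (b ++ [v], q ++ [f]) =
      ((pvColFall i (b, q)).1 ++ [v], (pvColFall i (b, q)).2 ++ [f]) := by
  unfold pvColFall
  simp only
  have hgq : (q ++ [f]).getD i.toNat 0 = q.getD i.toNat 0 :=
    List.getD_append _ _ _ _ (by omega)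
  rw [hgq, pvColFind_append q [f] (i - 1) (by omega)]
  by_cases hc : q.getD i.toNat 0 = 1
  · rw [if_pos hc, if_pos hc]
    have hfle : pvColFind q (i - 1) ≤ i - 1 := pvColFind_le q (i - 1)
    by_cases hneg : pvColFind q (i - 1) < 0
    · rw [if_pos hneg, if_pos hneg, List.set_append_left _ _ (by omega)]
    · rw [if_neg hneg, if_neg hneg, List.set_append_left _ _ (by omega),
        List.set_append_left _ _ (by omega),
        List.getD_append _ _ _ _ (by omega)]
  · rw [if_neg hc, if_neg hc]

lemma pvColRun_append (k : Nat) : ∀ (b q : List Int) (v f : Int),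
    k ≤ b.length → b.length = q.length →
    pvColRun k (b ++ [v], q ++ [f]) =
      ((pvColRun k (b, q)).1 ++ [v], (pvColRun k (b, q)).2 ++ [f]) := by
  induction k with
  | zero => intro b q v f hb hq; simp [pvColRun]
  | succ k ih =>
    intro b q v f hb hq
    rw [pvColRun, pvColRun]
    rw [pvColFall_append (k : Int) b q v f (by omega) (by omega) (by omega)]
    obtain ⟨hl1, hl2⟩ := pvColFall_lengths (k : Int) (b, q)
    dsimp only at hl1 hl2
    exact ih _ _ v f (by omega) (by omega)

lemma pvTakeGetDrop (l : List Int) (i : Nat) (h : i < l.length) :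
    l.take i ++ l[i] :: l.drop (i+1) = l := by
  rw [← List.drop_eq_getElem_cons h, List.take_append_drop]

lemma pvSetAppendCons (l₁ l₂ : List Int) (a b : Int) :
    (l₁ ++ a :: l₂).set l₁.length b = l₁ ++ b :: l₂ := by
  rw [List.set_append, if_neg (by omega)]
  simp

lemma pvGetDAppendCons (l₁ l₂ : List Int) (a d : Int) :
    (l₁ ++ a :: l₂).getD l₁.length d = a := by
  have hlt : l₁.length < (l₁ ++ a :: l₂).length := by simp
  rw [List.getD_eq_getElem _ _ hlt]
  simp

lemma pvSetConcat (l : List Int) (a b : Int) :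
    (l ++ [a]).set l.length b = l ++ [b] := pvSetAppendCons l [] a b

lemma pvKeep_cons (x y : Int) (b q : List Int) :
    pvKeep (x :: b) (y :: q) = (if y = 1 then [] else [x]) ++ pvKeep b q := by
  unfold pvKeep
  rw [List.zip_cons_cons, List.filterMap_cons]
  split <;> simp_all

lemma pvColRun_eq (k : Nat) : ∀ (b q : List Int), b.length = k → q.length = k →
    (∀ e ∈ q, e = 0 ∨ e = 1) →
    (pvColRun k (b, q)).1 =
      List.replicate (k - (pvKeep b q).length) 0 ++ pvKeep b q := by
  induction k with
  | zero =>
    intro b q hb hq _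
    rw [List.eq_nil_of_length_eq_zero hb, List.eq_nil_of_length_eq_zero hq]
    simp [pvColRun, pvKeep]
  | succ k ih =>
    intro b q hb hq h01
    rcases b.eq_nil_or_concat with rfl | ⟨b₀, v, rfl⟩
    · simp at hb
    rcases q.eq_nil_or_concat with rfl | ⟨q₀, f, rfl⟩
    · simp at hq
    simp only [List.concat_eq_append] at *
    have hb₀ : b₀.length = k := by simpa using hb
    have hq₀ : q₀.length = k := by simpa using hq
    have h01' : ∀ e ∈ q₀, e = 0 ∨ e = 1 := fun e he => h01 e (by simp [he])
    have hf01 : f = 0 ∨ f = 1 := h01 f (by simp)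
    have hguard : (q₀ ++ [f]).getD ((k : Int)).toNat 0 = f := by
      rw [show ((k : Int)).toNat = q₀.length by omega]
      exact pvGetD_concat _ _ _
    rw [pvColRun]
    by_cases hf : f = 1
    · -- the bottom cell of this step is removed
      have hfind : pvColFind (q₀ ++ [f]) ((k : Int) - 1) =
          pvColFind q₀ ((q₀.length : Int) - 1) := by
        rw [pvColFind_append q₀ [f] _ (by omega)]
        congr 1
        omega
      rcases pvColFind_last q₀ h01' with ⟨hv, hall⟩ | ⟨u, w, hqe, hw, hv⟩
      · -- the whole column above is removed too: cell becomes 0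
        have hstep : pvColFall (k : Int) (b₀ ++ [v], q₀ ++ [f]) = (b₀ ++ [0], q₀ ++ [f]) := by
          unfold pvColFall
          dsimp only
          rw [hguard, if_pos hf, hfind, hv, if_pos (by norm_num),
            show ((k : Int)).toNat = b₀.length by omega, pvSetConcat]
        rw [hstep, pvColRun_append k b₀ q₀ 0 f (by omega) (by omega)]
        dsimp only
        rw [ih b₀ q₀ hb₀ hq₀ h01']
        have hk₀ : pvKeep b₀ q₀ = [] := pvKeep_all_one b₀ q₀ hall
        have hktot : pvKeep (b₀ ++ [v]) (q₀ ++ [f]) = [] := by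
          rw [pvKeep_append b₀ [v] q₀ [f] (by omega), hk₀, hf]
          simp [pvKeep]
        rw [hk₀, hktot]
        simp [← List.replicate_succ']
      · -- a survivor above falls into this cell
        have hulen : u.length < b₀.length := by
          rw [hqe] at hq₀; simp at hq₀; omega
        obtain ⟨bu, bv, bw, hbe, hbu⟩ :
            ∃ bu bv bw, b₀ = bu ++ bv :: bw ∧ bu.length = u.length :=
          ⟨b₀.take u.length, b₀[u.length], b₀.drop (u.length+1),
            (pvTakeGetDrop b₀ u.length hulen).symm, by simp; omega⟩
        have hstep : pvColFall (k : Int) (b₀ ++ [v], q₀ ++ [f]) =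
            (b₀ ++ [bv], (u ++ 1 :: w) ++ [f]) := by
          unfold pvColFall
          dsimp only
          rw [hguard, if_pos hf, hfind, hv, if_neg (by omega)]
          congr 1
          · have hgd : (b₀ ++ [v]).getD ((u.length : Int)).toNat 0 = bv := by
              rw [show ((u.length : Int)).toNat = u.length by omega,
                List.getD_append _ _ _ _ (by omega), hbe, ← hbu]
              exact pvGetDAppendCons _ _ _ _
            rw [hgd, show ((k : Int)).toNat = b₀.length by omega, pvSetConcat]
          · rw [show ((u.length : Int)).toNat = u.length by omega,
              List.set_append_left _ _ (by omega), hqe,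
              show u.length = (u : List Int).length from rfl, pvSetAppendCons]
        have hlen' : (u ++ 1 :: w : List Int).length = k := by
          rw [hqe] at hq₀; simpa using hq₀
        rw [hstep, pvColRun_append k b₀ (u ++ 1 :: w) bv f (by omega) (by omega)]
        dsimp only
        have h01'' : ∀ e ∈ (u ++ 1 :: w : List Int), e = 0 ∨ e = 1 := by
          intro e he
          rcases List.mem_append.mp he with h | h
          · exact h01' e (by rw [hqe]; exact List.mem_append_left _ h)
          · rcases List.mem_cons.mp h with h | h
            · right; exact h
            · right; exact hw e h
        rw [ih b₀ (u ++ 1 :: w) hb₀ hlen' h01'']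
        have hkw : pvKeep bw w = [] := pvKeep_all_one bw w hw
        have hk' : pvKeep b₀ (u ++ 1 :: w) = pvKeep bu u := by
          rw [hbe, pvKeep_append bu (bv :: bw) u (1 :: w) hbu, pvKeep_cons]
          simp [hkw]
        have hk₀ : pvKeep b₀ q₀ = pvKeep bu u ++ [bv] := by
          rw [hbe, hqe, pvKeep_append bu (bv :: bw) u (0 :: w) hbu, pvKeep_cons]
          simp [hkw]
        have hktot : pvKeep (b₀ ++ [v]) (q₀ ++ [f]) = pvKeep bu u ++ [bv] := by
          rw [pvKeep_append b₀ [v] q₀ [f] (by omega), hk₀, hf]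
          simp [pvKeep]
        rw [hk', hktot]
        have hle : (pvKeep bu u).length ≤ k := by
          have h1 := pvKeep_length_le bu u
          have h2 : bu.length ≤ b₀.length := by rw [hbe]; simp
          omega
        simp only [List.length_append, List.length_cons, List.length_nil]
        rw [show k + 1 - ((pvKeep bu u).length + 1) = k - (pvKeep bu u).length by omega,
          List.append_assoc]
    · -- survivor: this step does nothing
      have hstep : pvColFall (k : Int) (b₀ ++ [v], q₀ ++ [f]) = (b₀ ++ [v], q₀ ++ [f]) := by
        unfold pvColFall
        dsimp only
        rw [hguard, if_neg hf]
      rw [hstep, pvColRun_append k b₀ q₀ v f (by omega) (by omega)]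
      dsimp only
      rw [ih b₀ q₀ hb₀ hq₀ h01']
      have hf0 : f = 0 := by tauto
      have hktot : pvKeep (b₀ ++ [v]) (q₀ ++ [f]) = pvKeep b₀ q₀ ++ [v] := by
        rw [pvKeep_append b₀ [v] q₀ [f] (by omega), hf0]
        simp [pvKeep]
      rw [hktot]
      have hle : (pvKeep b₀ q₀).length ≤ k := by
        have := pvKeep_length_le b₀ q₀; omega
      simp only [List.length_append, List.length_cons, List.length_nil]
      rw [show k + 1 - ((pvKeep b₀ q₀).length + 1) = k - (pvKeep b₀ q₀).length by omega,
        List.append_assoc]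

-- ===== grid projections and shapes =====

def pvE (g : List (List Int)) (i j : Nat) : Int := (g.getD i []).getD j 0

def pvColL (M j : Nat) (g : List (List Int)) : List Int :=
  (g.take M).map (fun r => r.getD j 0)

def pvSetN (g : List (List Int)) (a b : Nat) (v : Int) : List (List Int) :=
  g.modify a (fun r => r.set b v)

def pvGShape (M N : Nat) (G : List (List Int)) : Prop :=
  M ≤ G.length ∧ ∀ a, a < M → N ≤ (G.getD a []).length

def pvCShape (M N : Nat) (C : List (List Int)) : Prop :=
  C.length = M ∧ ∀ a, a < M → (C.getD a []).length = N

lemma pvSet_toNat (g : List (List Int)) (i j : Int) (v : Int) :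
    pvSet g i j v = pvSetN g i.toNat j.toNat v := rfl

lemma pvGet_toNat (g : List (List Int)) (i j : Int) :
    pvGet g i j = pvE g i.toNat j.toNat := rfl

lemma pvRowLen_of_mapLen {G G' : List (List Int)}
    (h : G'.map List.length = G.map List.length) (a : Nat) :
    (G'.getD a []).length = (G.getD a []).length := by
  have hlen : G'.length = G.length := by
    have := congrArg List.length h; simpa using this
  by_cases ha : a < G.length
  · rw [List.getD_eq_getElem G' [] (by omega), List.getD_eq_getElem G [] ha]
    have h1 : (G'.map List.length).getD a 0 = (G.map List.length).getD a 0 := by rw [h]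
    rw [List.getD_eq_getElem _ _ (by simp; omega), List.getD_eq_getElem _ _ (by simp; omega)] at h1
    simpa using h1
  · rw [List.getD_eq_default _ _ (by omega), List.getD_eq_default _ _ (by omega)]

lemma pvGShape_of_mapLen {M N : Nat} {G G' : List (List Int)}
    (h : G'.map List.length = G.map List.length) (hs : pvGShape M N G) :
    pvGShape M N G' := by
  obtain ⟨h1, h2⟩ := hs
  have hlen : G'.length = G.length := by
    have := congrArg List.length h; simpa using this
  exact ⟨by omega, fun a ha => by rw [pvRowLen_of_mapLen h]; exact h2 a ha⟩

lemma pvCShape_of_mapLen {M N : Nat} {C C' : List (List Int)}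
    (h : C'.map List.length = C.map List.length) (hs : pvCShape M N C) :
    pvCShape M N C' := by
  obtain ⟨h1, h2⟩ := hs
  have hlen : C'.length = C.length := by
    have := congrArg List.length h; simpa using this
  exact ⟨by omega, fun a ha => by rw [pvRowLen_of_mapLen h]; exact h2 a ha⟩

lemma pvColL_length {M j : Nat} {g : List (List Int)} (h : M ≤ g.length) :
    (pvColL M j g).length = M := by
  simp [pvColL]; omega

lemma pvColL_getD {M j : Nat} {g : List (List Int)} {i : Nat}
    (hi : i < M) (h : M ≤ g.length) :
    (pvColL M j g).getD i 0 = pvE g i j := by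
  unfold pvColL pvE
  rw [List.getD_eq_getElem _ _ (by simp; omega)]
  rw [List.getElem_map, List.getElem_take, List.getD_eq_getElem g [] (by omega)]

lemma pvSetN_mapLen (g : List (List Int)) (a b : Nat) (v : Int) :
    (pvSetN g a b v).map List.length = g.map List.length := by
  apply List.ext_getElem
  · simp [pvSetN]
  · intro t h1 h2
    simp only [pvSetN, List.getElem_map, List.getElem_modify]
    split <;> simp_all

lemma pvE_setN_ne (g : List (List Int)) (a b : Nat) (v : Int) (x y : Nat)
    (h : ¬(x = a ∧ y = b)) : pvE (pvSetN g a b v) x y = pvE g x y := by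
  unfold pvE pvSetN
  by_cases hx : x < g.length
  · rw [List.getD_eq_getElem _ [] (by simpa using hx), List.getD_eq_getElem g [] hx,
      List.getElem_modify]
    by_cases hxa : a = x
    · rw [if_pos hxa]
      have hy : y ≠ b := by tauto
      by_cases hyl : y < g[x].length
      · rw [List.getD_eq_getElem _ _ (by simpa using hyl), List.getD_eq_getElem _ _ hyl,
          List.getElem_set_ne (by omega)]
      · rw [List.getD_eq_default _ _ (by simpa using hyl), List.getD_eq_default _ _ (by omega)]
    · rw [if_neg hxa]
  · rw [List.getD_eq_default _ [] (by simp only [List.length_modify]; omega),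
      List.getD_eq_default _ [] (by omega)]

lemma pvE_setN_eq (g : List (List Int)) (a b : Nat) (v : Int)
    (ha : a < g.length) (hb : b < (g.getD a []).length) :
    pvE (pvSetN g a b v) a b = v := by
  unfold pvE pvSetN
  rw [List.getD_eq_getElem _ [] (by simp; omega), List.getElem_modify, if_pos rfl]
  rw [List.getD_eq_getElem g [] ha] at hb
  rw [List.getD_eq_getElem _ _ (by simp; omega), List.getElem_set_self]

lemma pvColL_setN_ne (g : List (List Int)) (M : Nat) (a b : Nat) (v : Int) (j : Nat)
    (h : j ≠ b) : pvColL M j (pvSetN g a b v) = pvColL M j g := by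
  apply List.ext_getElem
  · simp [pvColL, pvSetN]
  · intro t h1 h2
    have htg : t < g.length := by simp [pvColL] at h2; omega
    simp only [pvColL, List.getElem_map, List.getElem_take, pvSetN, List.getElem_modify]
    by_cases hta : a = t
    · rw [if_pos hta]
      by_cases hjl : j < g[t].length
      · rw [List.getD_eq_getElem _ _ (by simpa using hjl), List.getD_eq_getElem _ _ hjl,
          List.getElem_set_ne (by omega)]
      · rw [List.getD_eq_default _ _ (by simpa using hjl), List.getD_eq_default _ _ (by omega)]
    · rw [if_neg hta]

lemma pvColL_setN_same (g : List (List Int)) (M : Nat) (a b : Nat) (v : Int)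
    (hM : M ≤ g.length) (ha : a < M) (hb : b < (g.getD a []).length) :
    pvColL M b (pvSetN g a b v) = (pvColL M b g).set a v := by
  apply List.ext_getElem
  · simp [pvColL, pvSetN]
  · intro t h1 h2
    have htg : t < g.length := by simp [pvColL, pvSetN] at h1; omega
    simp only [pvColL, List.getElem_map, List.getElem_take, pvSetN, List.getElem_modify]
    by_cases hta : a = t
    · subst hta
      rw [List.getD_eq_getElem g [] htg] at hb
      rw [if_pos rfl, List.getElem_set_self (by simpa [pvColL] using And.intro ha (by omega)),
        List.getD_eq_getElem _ _ (by simpa using hb), List.getElem_set_self]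
    · rw [if_neg hta, List.getElem_set_ne (by omega)]
      simp only [List.getElem_map, List.getElem_take]

lemma pvFindUp_eq (c : List (List Int)) (j : Int) (M : Nat) (hM : M ≤ c.length) :
    ∀ x : Int, x < M → pvFindUp c j x = pvColFind (pvColL M j.toNat c) x := by
  intro x
  induction hn : (x + 1).toNat using Nat.strong_induction_on generalizing x with
  | _ n ih =>
    intro hx
    by_cases h0 : 0 ≤ x
    · have hget : pvGet c x j = (pvColL M j.toNat c).getD x.toNat 0 := by
        rw [pvGet_toNat, pvColL_getD (by omega) hM]
      by_cases hc : pvGet c x j = 1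
      · rw [pvFindUp, dif_pos ⟨h0, hc⟩, pvColFind_step _ _ ⟨h0, by rw [← hget]; exact hc⟩]
        exact ih ((x - 1) + 1).toNat (by omega) (x - 1) (by omega) (by omega)
      · rw [pvFindUp, dif_neg (by tauto), pvColFind_stop _ _ (by rw [← hget]; tauto)]
    · rw [pvFindUp, dif_neg (by tauto), pvColFind_stop _ _ (by tauto)]

-- one cell of A's gravity loop, seen through the column projections
lemma pvFallA_proj (M N : Nat) (G C : List (List Int)) (i j : Int)
    (hi0 : 0 ≤ i) (hiM : i < M) (hj0 : 0 ≤ j) (hjN : j < N)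
    (hG : pvGShape M N G) (hC : pvCShape M N C) :
    (pvFallA i j (G, C)).1.map List.length = G.map List.length ∧
    (pvFallA i j (G, C)).2.map List.length = C.map List.length ∧
    (∀ j0 : Nat, j0 ≠ j.toNat →
      pvColL M j0 (pvFallA i j (G, C)).1 = pvColL M j0 G ∧
      pvColL M j0 (pvFallA i j (G, C)).2 = pvColL M j0 C) ∧
    (pvColL M j.toNat (pvFallA i j (G, C)).1, pvColL M j.toNat (pvFallA i j (G, C)).2) =
      pvColFall i (pvColL M j.toNat G, pvColL M j.toNat C) ∧
    (∀ x y : Nat, ¬(x < M ∧ y < N) → pvE (pvFallA i j (G, C)).1 x y = pvE G x y) := by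
  obtain ⟨hGM, hGrow⟩ := hG
  obtain ⟨hCM, hCrow⟩ := hC
  have hMC : M ≤ C.length := by omega
  have hguard : pvGet C i j = (pvColL M j.toNat C).getD i.toNat 0 := by
    rw [pvGet_toNat, pvColL_getD (by omega) hMC]
  by_cases hc : pvGet C i j = 1
  · have hfind : pvFindUp C j (i - 1) = pvColFind (pvColL M j.toNat C) (i - 1) :=
      pvFindUp_eq C j M hMC (i - 1) (by omega)
    by_cases hneg : pvFindUp C j (i - 1) < 0
    · have hfall : pvFallA i j (G, C) = (pvSetN G i.toNat j.toNat 0, C) := by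
        unfold pvFallA
        rw [if_pos hc, if_pos hneg, pvSet_toNat]
      have hcolfall : pvColFall i (pvColL M j.toNat G, pvColL M j.toNat C) =
          ((pvColL M j.toNat G).set i.toNat 0, pvColL M j.toNat C) := by
        unfold pvColFall
        dsimp only
        rw [← hguard, if_pos hc, ← hfind, if_pos hneg]
      rw [hfall, hcolfall]
      refine ⟨pvSetN_mapLen G _ _ 0, rfl, ?_, ?_, ?_⟩
      · intro j0 hj0'
        exact ⟨pvColL_setN_ne G M _ _ 0 j0 hj0', rfl⟩
      · rw [pvColL_setN_same G M _ _ 0 hGM (by omega) (by have := hGrow i.toNat (by omega); omega)]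
      · intro x y hxy
        exact pvE_setN_ne G _ _ 0 x y (by omega)
    · have hxle : pvFindUp C j (i - 1) ≤ i - 1 := by rw [hfind]; exact pvColFind_le _ _
      have hx0 : 0 ≤ pvFindUp C j (i - 1) := by omega
      have hxM : pvFindUp C j (i - 1) < M := by omega
      have hvalg : pvGet G (pvFindUp C j (i - 1)) j =
          (pvColL M j.toNat G).getD (pvFindUp C j (i - 1)).toNat 0 := by
        rw [pvGet_toNat, pvColL_getD (by omega) hGM]
      have hfall : pvFallA i j (G, C) =
          (pvSetN G i.toNat j.toNat (pvGet G (pvFindUp C j (i - 1)) j),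
           pvSetN C (pvFindUp C j (i - 1)).toNat j.toNat 1) := by
        unfold pvFallA
        rw [if_pos hc, if_neg hneg, pvSet_toNat, pvSet_toNat]
      have hcolfall : pvColFall i (pvColL M j.toNat G, pvColL M j.toNat C) =
          ((pvColL M j.toNat G).set i.toNat (pvGet G (pvFindUp C j (i - 1)) j),
           (pvColL M j.toNat C).set (pvFindUp C j (i - 1)).toNat 1) := by
        unfold pvColFall
        dsimp only
        rw [← hguard, if_pos hc, ← hfind, if_neg hneg, ← hvalg]
      rw [hfall, hcolfall]
      refine ⟨pvSetN_mapLen G _ _ _, pvSetN_mapLen C _ _ 1, ?_, ?_, ?_⟩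
      · intro j0 hj0'
        exact ⟨pvColL_setN_ne G M _ _ _ j0 hj0', pvColL_setN_ne C M _ _ 1 j0 hj0'⟩
      · rw [pvColL_setN_same G M _ _ _ hGM (by omega) (by have := hGrow i.toNat (by omega); omega),
          pvColL_setN_same C M _ _ 1 hMC (by omega) (by have := hCrow (pvFindUp C j (i - 1)).toNat (by omega); omega)]
      · intro x y hxy
        exact pvE_setN_ne G _ _ _ x y (by omega)
  · have hfall : pvFallA i j (G, C) = (G, C) := by
      unfold pvFallA
      rw [if_neg hc]
    have hcolfall : pvColFall i (pvColL M j.toNat G, pvColL M j.toNat C) =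
        (pvColL M j.toNat G, pvColL M j.toNat C) := by
      unfold pvColFall
      dsimp only
      rw [← hguard, if_neg hc]
    rw [hfall, hcolfall]
    exact ⟨rfl, rfl, fun _ _ => ⟨rfl, rfl⟩, rfl, fun _ _ _ => rfl⟩

-- a whole row pass of A's gravity loop, seen through the column projections
lemma pvInner_proj (M N : Nat) (i : Int) (hi0 : 0 ≤ i) (hiM : i < M) :
    ∀ (l : List Int) (G C : List (List Int)),
    (∀ x ∈ l, 0 ≤ x ∧ x < (N : Int)) → l.Nodup →
    pvGShape M N G → pvCShape M N C →
    ((l.foldl (fun s j => pvFallA i j s) (G, C)).1.map List.length = G.map List.length ∧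
     (l.foldl (fun s j => pvFallA i j s) (G, C)).2.map List.length = C.map List.length) ∧
    (∀ j0 : Nat,
      (pvColL M j0 (l.foldl (fun s j => pvFallA i j s) (G, C)).1,
       pvColL M j0 (l.foldl (fun s j => pvFallA i j s) (G, C)).2) =
        (if (j0 : Int) ∈ l then pvColFall i (pvColL M j0 G, pvColL M j0 C)
         else (pvColL M j0 G, pvColL M j0 C))) ∧
    (∀ x y : Nat, ¬(x < M ∧ y < N) →
      pvE (l.foldl (fun s j => pvFallA i j s) (G, C)).1 x y = pvE G x y) := by
  intro l
  induction l with
  | nil =>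
    intro G C _ _ _ _
    exact ⟨⟨rfl, rfl⟩, fun j0 => by simp, fun _ _ _ => rfl⟩
  | cons j t ih =>
    intro G C hl hnd hG hC
    have hj : 0 ≤ j ∧ j < (N : Int) := hl j (List.mem_cons_self)
    obtain ⟨s1, s2, s3, s4, s5⟩ :=
      pvFallA_proj M N G C i j hi0 hiM hj.1 hj.2 hG hC
    rw [List.foldl_cons]
    obtain ⟨⟨t1, t2⟩, t3, t4⟩ :=
      ih (pvFallA i j (G, C)).1 (pvFallA i j (G, C)).2
        (fun x hx => hl x (List.mem_cons_of_mem _ hx)) (List.Nodup.of_cons hnd)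
        (pvGShape_of_mapLen s1 hG) (pvCShape_of_mapLen s2 hC)
    refine ⟨⟨t1.trans s1, t2.trans s2⟩, ?_, ?_⟩
    · intro j0
      by_cases hjj : j0 = j.toNat
      · have hmem : (j0 : Int) = j := by omega
        have hnotin : (j0 : Int) ∉ t := by
          rw [hmem]
          exact (List.nodup_cons.mp hnd).1
        rw [t3 j0, if_neg hnotin, if_pos (by rw [hmem]; exact List.mem_cons_self)]
        subst hjj
        exact s4
      · have hcols := s3 j0 hjj
        rw [t3 j0, hcols.1, hcols.2]
        by_cases hmem : (j0 : Int) ∈ t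
        · rw [if_pos hmem, if_pos (List.mem_cons_of_mem _ hmem)]
        · rw [if_neg hmem, if_neg (by
            intro hcon
            rcases List.mem_cons.mp hcon with hcon | hcon
            · exact hjj (by omega)
            · exact hmem hcon)]
    · intro x y hxy
      rw [t4 x y hxy, s5 x y hxy]

-- the whole of A's gravity double loop, through the column projections
lemma pvOuter_proj (M N : Nat) (n : Int) (hn : n = (N : Int)) :
    ∀ (L : List Int) (G C : List (List Int)),
    (∀ x ∈ L, 0 ≤ x ∧ x < (M : Int)) →
    pvGShape M N G → pvCShape M N C →
    ((L.foldl (fun s i => (PySem.List.pyRange 0 n 1).foldl (fun s j => pvFallA i j s) s) (G, C)).1.map List.length = G.map List.length ∧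
     (L.foldl (fun s i => (PySem.List.pyRange 0 n 1).foldl (fun s j => pvFallA i j s) s) (G, C)).2.map List.length = C.map List.length) ∧
    (∀ j0 : Nat, j0 < N →
      (pvColL M j0 (L.foldl (fun s i => (PySem.List.pyRange 0 n 1).foldl (fun s j => pvFallA i j s) s) (G, C)).1,
       pvColL M j0 (L.foldl (fun s i => (PySem.List.pyRange 0 n 1).foldl (fun s j => pvFallA i j s) s) (G, C)).2) =
        L.foldl (fun p i => pvColFall i p) (pvColL M j0 G, pvColL M j0 C)) ∧
    (∀ x y : Nat, ¬(x < M ∧ y < N) →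
      pvE (L.foldl (fun s i => (PySem.List.pyRange 0 n 1).foldl (fun s j => pvFallA i j s) s) (G, C)).1 x y = pvE G x y) := by
  intro L
  induction L with
  | nil =>
    intro G C _ _ _
    exact ⟨⟨rfl, rfl⟩, fun j0 _ => rfl, fun _ _ _ => rfl⟩
  | cons i T ih =>
    intro G C hL hG hC
    have hi : 0 ≤ i ∧ i < (M : Int) := hL i (List.mem_cons_self)
    obtain ⟨⟨s1, s2⟩, s3, s4⟩ :=
      pvInner_proj M N i hi.1 hi.2 (PySem.List.pyRange 0 n 1) G C
        (fun x hx => by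
          rw [PySem.List.mem_pyRange_one] at hx
          omega)
        (PySem.List.nodup_pyRange_one 0 n) hG hC
    rw [List.foldl_cons]
    obtain ⟨⟨t1, t2⟩, t3, t4⟩ :=
      ih ((PySem.List.pyRange 0 n 1).foldl (fun s j => pvFallA i j s) (G, C)).1
        ((PySem.List.pyRange 0 n 1).foldl (fun s j => pvFallA i j s) (G, C)).2
        (fun x hx => hL x (List.mem_cons_of_mem _ hx))
        (pvGShape_of_mapLen s1 hG) (pvCShape_of_mapLen s2 hC)
    refine ⟨⟨t1.trans s1, t2.trans s2⟩, ?_, ?_⟩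
    · intro j0 hj0
      have hmem : ((j0 : Int)) ∈ PySem.List.pyRange 0 n 1 := by
        rw [PySem.List.mem_pyRange_one]
        omega
      rw [t3 j0 hj0]
      have hpair := s3 j0
      rw [if_pos hmem] at hpair
      rw [hpair, List.foldl_cons]
    · intro x y hxy
      rw [t4 x y hxy, s4 x y hxy]

lemma pvCountdown_colRun : ∀ (M : Nat) (p : List Int × List Int),
    (PySem.List.pyRange ((M : Int) - 1) (-1) (-1)).foldl (fun p i => pvColFall i p) p =
      pvColRun M p := by
  intro M
  induction M with
  | zero =>
    intro p
    rw [PySem.List.pyRange_neg_one_eq_nil (by norm_num)]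
    rfl
  | succ M ih =>
    intro p
    rw [show ((M + 1 : Nat) : Int) - 1 = (M : Int) by push_cast; ring,
      PySem.List.pyRange_neg_one_cons (by omega), List.foldl_cons, pvColRun]
    exact ih (pvColFall (M : Int) p)

--全 characterization of A's gravity step
lemma pvGravA_char (m n : Int) (g c : List (List Int)) (h0m : 0 ≤ m) (h0n : 0 ≤ n)
    (hG : pvGShape m.toNat n.toNat g) (hC : pvCShape m.toNat n.toNat c) :
    (pvGravA m n g c).map List.length = g.map List.length ∧
    (∀ j0 : Nat, j0 < n.toNat →
      pvColL m.toNat j0 (pvGravA m n g c) =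
        (pvColRun m.toNat (pvColL m.toNat j0 g, pvColL m.toNat j0 c)).1) ∧
    (∀ x y : Nat, ¬(x < m.toNat ∧ y < n.toNat) → pvE (pvGravA m n g c) x y = pvE g x y) := by
  obtain ⟨⟨s1, _⟩, s3, s4⟩ :=
    pvOuter_proj m.toNat n.toNat n (by omega) (PySem.List.pyRange (m-1) (-1) (-1)) g c
      (fun x hx => by
        rw [PySem.List.mem_pyRange_neg_one] at hx
        omega)
      hG hC
  refine ⟨s1, ?_, s4⟩
  intro j0 hj0
  have := s3 j0 hj0
  rw [show (m : Int) - 1 = ((m.toNat : Nat) : Int) - 1 by omega] at this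
  rw [pvGravA]
  rw [show (m : Int) - 1 = ((m.toNat : Nat) : Int) - 1 by omega]
  rw [pvCountdown_colRun m.toNat] at this
  exact congrArg Prod.fst this

-- B's survivors comprehension builds exactly pvKeep of the two column projections
lemma pvKeep_singleton (a e : Int) : pvKeep [a] [e] = if e = 1 then [] else [a] := by
  unfold pvKeep
  rw [show ([a].zip [e] : List (Int × Int)) = [(a, e)] from rfl, List.filterMap_cons]
  split <;> simp_all

lemma pvSurv_eq (rm : PySem.Set (Int × Int)) (G c : List (List Int)) (j : Int)
    (M : Nat) (hGM : M ≤ G.length) (hCM : M ≤ c.length)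
    (hIff : ∀ i0 : Nat, i0 < M →
      (PySem.Set.contains rm (((i0 : Nat) : Int), j) = true ↔ pvE c i0 j.toNat = 1)) :
    ∀ t : Nat, t ≤ M →
    (PySem.List.pyRange 0 (t : Int) 1).foldl
        (fun acc i => if PySem.Set.contains rm (i, j) then acc else acc ++ [pvGet G i j]) [] =
      pvKeep ((pvColL M j.toNat G).take t) ((pvColL M j.toNat c).take t) := by
  intro t
  induction t with
  | zero =>
    intro _
    rw [PySem.List.pyRange_one_eq_nil (by norm_num)]
    simp [pvKeep]
  | succ t ih =>
    intro ht
    rw [show ((t + 1 : Nat) : Int) = (t : Int) + 1 by push_cast; ring,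
      PySem.List.pyRange_one_succ_right (by omega), List.foldl_append, List.foldl_cons,
      List.foldl_nil, ih (by omega)]
    have hbl : ((pvColL M j.toNat G).take t).length = t := by
      rw [List.length_take, pvColL_length hGM]; omega
    have hql : ((pvColL M j.toNat c).take t).length = t := by
      rw [List.length_take, pvColL_length hCM]; omega
    have hltG : t < (pvColL M j.toNat G).length := by rw [pvColL_length hGM]; omega
    have hltC : t < (pvColL M j.toNat c).length := by rw [pvColL_length hCM]; omega
    have hbt : (pvColL M j.toNat G).take (t + 1) =
        (pvColL M j.toNat G).take t ++ [(pvColL M j.toNat G).getD t 0] := by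
      rw [List.take_succ, List.getElem?_eq_getElem hltG, List.getD_eq_getElem _ _ hltG]
      rfl
    have hqt : (pvColL M j.toNat c).take (t + 1) =
        (pvColL M j.toNat c).take t ++ [(pvColL M j.toNat c).getD t 0] := by
      rw [List.take_succ, List.getElem?_eq_getElem hltC, List.getD_eq_getElem _ _ hltC]
      rfl
    rw [hbt, hqt, pvKeep_append _ _ _ _ (by omega)]
    have hget : pvGet G (t : Int) j = (pvColL M j.toNat G).getD t 0 := by
      rw [pvGet_toNat, pvColL_getD (by omega) hGM]
      norm_num
    by_cases hmem : PySem.Set.contains rm (((t : Nat) : Int), j) = true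
    · have hq1 : (pvColL M j.toNat c).getD t 0 = 1 := by
        rw [pvColL_getD (by omega) hCM]
        exact ((hIff t (by omega)).mp hmem)
      rw [if_pos hmem, pvKeep_singleton, if_pos hq1, List.append_nil]
    · have hq1 : (pvColL M j.toNat c).getD t 0 ≠ 1 := by
        rw [pvColL_getD (by omega) hCM]
        intro hcon
        exact hmem ((hIff t (by omega)).mpr hcon)
      rw [if_neg hmem, hget, pvKeep_singleton, if_neg hq1]

-- writing a whole column cell by cell
lemma pvWriteCol (M N : Nat) (j : Int) (hj0 : 0 ≤ j) (hjN : j.toNat < N) (val : Int → Int) :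
    ∀ (t : Nat), t ≤ M → ∀ (G : List (List Int)), pvGShape M N G →
    ((PySem.List.pyRange 0 (t : Int) 1).foldl
        (fun G i => pvSet G i j (val i)) G).map List.length = G.map List.length ∧
    (∀ j0 : Nat, j0 ≠ j.toNat →
      pvColL M j0 ((PySem.List.pyRange 0 (t : Int) 1).foldl (fun G i => pvSet G i j (val i)) G) =
        pvColL M j0 G) ∧
    (pvColL M j.toNat ((PySem.List.pyRange 0 (t : Int) 1).foldl (fun G i => pvSet G i j (val i)) G) =
      (List.range t).map (fun i => val (i : Int)) ++ (pvColL M j.toNat G).drop t) ∧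
    (∀ x y : Nat, ¬(x < M ∧ y < N) →
      pvE ((PySem.List.pyRange 0 (t : Int) 1).foldl (fun G i => pvSet G i j (val i)) G) x y =
        pvE G x y) := by
  intro t
  induction t with
  | zero =>
    intro _ G hG
    rw [PySem.List.pyRange_one_eq_nil (by norm_num)]
    exact ⟨rfl, fun _ _ => rfl, by simp, fun _ _ _ => rfl⟩
  | succ t ih =>
    intro ht G hG
    obtain ⟨i1, i2, i3, i4⟩ := ih (by omega) G hG
    rw [show ((t + 1 : Nat) : Int) = (t : Int) + 1 by push_cast; ring,
      PySem.List.pyRange_one_succ_right (by omega), List.foldl_append, List.foldl_cons,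
      List.foldl_nil]
    set W := (PySem.List.pyRange 0 (t : Int) 1).foldl (fun G i => pvSet G i j (val i)) G with hW
    have hWG : pvGShape M N W := pvGShape_of_mapLen i1 hG
    have hWM : M ≤ W.length := hWG.1
    have hrow : j.toNat < (W.getD ((t : Int)).toNat []).length := by
      have := hWG.2 ((t : Int)).toNat (by omega)
      omega
    have hcol : pvColL M j.toNat W = (List.range t).map (fun i => val (i : Int)) ++
        (pvColL M j.toNat G).drop t := i3
    refine ⟨?_, ?_, ?_, ?_⟩
    · rw [pvSet_toNat, pvSetN_mapLen, ← i1]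
    · intro j0 hj0'
      rw [pvSet_toNat, pvColL_setN_ne _ _ _ _ _ _ hj0', i2 j0 hj0']
    · have hdrop : (pvColL M j.toNat G).drop t =
          (pvColL M j.toNat G).getD t 0 :: (pvColL M j.toNat G).drop (t + 1) := by
        have hlt : t < (pvColL M j.toNat G).length := by rw [pvColL_length hG.1]; omega
        rw [List.getD_eq_getElem _ _ hlt, List.drop_eq_getElem_cons hlt]
      rw [pvSet_toNat, pvColL_setN_same W M _ _ _ hWM (by omega) hrow, hcol,
        show ((t : Int)).toNat = t by omega, hdrop]
      have hset := pvSetAppendCons ((List.range t).map (fun i => val (i : Int)))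
        ((pvColL M j.toNat G).drop (t + 1)) ((pvColL M j.toNat G).getD t 0) (val (t : Int))
      rw [show ((List.range t).map (fun i => val (i : Int))).length = t by simp] at hset
      rw [hset]
      simp [List.range_succ]
    · intro x y hxy
      rw [pvSet_toNat, pvE_setN_ne _ _ _ _ _ _ (by omega), i4 x y hxy]

lemma pvPadCol (M : Nat) (m : Int) (hm : m = (M : Int)) (surv : List Int)
    (hs : surv.length ≤ M) :
    (List.range M).map (fun i => if (i : Int) < m - (surv.length : Int) then 0
      else surv.getD (((i : Int) - (m - (surv.length : Int)))).toNat 0) =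
      List.replicate (M - surv.length) 0 ++ surv := by
  have hdo : (↑(List.range M) : List Int) = List.map (fun (a : Nat) => (a : Int)) (List.range M) := by
    simp only [List.pure_def, List.bind_eq_flatMap]
    exact Eq.symm List.map_eq_flatMap
  rw [hdo]
  apply List.ext_getElem
  · simp; omega
  · intro t h1 h2
    simp only [List.map_map, List.getElem_map, List.getElem_range, Function.comp]
    have h1' : t < M := by simp at h1; omega
    by_cases hlt : t < M - surv.length
    · rw [if_pos (by omega), List.getElem_append_left (by simp; omega),
        List.getElem_replicate]
    · rw [if_neg (by omega), List.getElem_append_right (by simp; omega)]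
      rw [List.getD_eq_getElem _ _ (by omega)]
      congr 1
      simp
      omega

-- characterization of one column drop in B
lemma pvDropCol_char (m : Int) (M N : Nat) (hm : m = (M : Int))
    (rm : PySem.Set (Int × Int)) (G c : List (List Int)) (j : Int)
    (hj0 : 0 ≤ j) (hjN : j.toNat < N)
    (hG : pvGShape M N G) (hCM : M ≤ c.length)
    (hIff : ∀ i0 : Nat, i0 < M →
      (PySem.Set.contains rm (((i0 : Nat) : Int), j) = true ↔ pvE c i0 j.toNat = 1)) :
    (pvDropCol m rm G j).map List.length = G.map List.length ∧
    (∀ j0 : Nat, j0 ≠ j.toNat → pvColL M j0 (pvDropCol m rm G j) = pvColL M j0 G) ∧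
    (pvColL M j.toNat (pvDropCol m rm G j) =
      List.replicate (M - (pvKeep (pvColL M j.toNat G) (pvColL M j.toNat c)).length) 0 ++
        pvKeep (pvColL M j.toNat G) (pvColL M j.toNat c)) ∧
    (∀ x y : Nat, ¬(x < M ∧ y < N) → pvE (pvDropCol m rm G j) x y = pvE G x y) := by
  have hGM : M ≤ G.length := hG.1
  have hsurv := pvSurv_eq rm G c j M hGM hCM hIff M (le_refl M)
  rw [List.take_of_length_le (by rw [pvColL_length hGM]),
    List.take_of_length_le (by rw [pvColL_length hCM])] at hsurv
  unfold pvDropCol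
  rw [hm]
  dsimp only
  rw [hsurv]
  set keep := pvKeep (pvColL M j.toNat G) (pvColL M j.toNat c) with hkeep
  have hklen : keep.length ≤ M := by
    have h1 := pvKeep_length_le (pvColL M j.toNat G) (pvColL M j.toNat c)
    rw [pvColL_length hGM] at h1
    exact h1
  obtain ⟨w1, w2, w3, w4⟩ := pvWriteCol M N j hj0 hjN
    (fun i => if i < (M : Int) - (keep.length : Int) then 0
      else keep.getD ((i - ((M : Int) - (keep.length : Int)))).toNat 0) M (le_refl M) G hG
  refine ⟨w1, w2, ?_, w4⟩
  rw [w3, List.drop_of_length_le (by rw [pvColL_length hGM])]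
  rw [List.append_nil]
  exact pvPadCol M (M : Int) rfl keep hklen

def pvTarget (M : Nat) (g c : List (List Int)) (j0 : Nat) : List Int :=
  List.replicate (M - (pvKeep (pvColL M j0 g) (pvColL M j0 c)).length) 0 ++
    pvKeep (pvColL M j0 g) (pvColL M j0 c)

-- B's gravity pass, column by column
lemma pvGravB_fold (m : Int) (M N : Nat) (hm : m = (M : Int))
    (rm : PySem.Set (Int × Int)) (g c : List (List Int)) (hCM : M ≤ c.length)
    (hIffAll : ∀ (i0 j0 : Nat), i0 < M → j0 < N →
      (PySem.Set.contains rm (((i0 : Nat) : Int), ((j0 : Nat) : Int)) = true ↔ pvE c i0 j0 = 1)) :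
    ∀ (l : List Int) (G : List (List Int)),
    (∀ x ∈ l, 0 ≤ x ∧ x < (N : Int)) → l.Nodup →
    pvGShape M N G →
    (∀ x ∈ l, pvColL M x.toNat G = pvColL M x.toNat g) →
    (l.foldl (fun G j => pvDropCol m rm G j) G).map List.length = G.map List.length ∧
    (∀ j0 : Nat, pvColL M j0 (l.foldl (fun G j => pvDropCol m rm G j) G) =
      (if (j0 : Int) ∈ l then pvTarget M g c j0 else pvColL M j0 G)) ∧
    (∀ x y : Nat, ¬(x < M ∧ y < N) →
      pvE (l.foldl (fun G j => pvDropCol m rm G j) G) x y = pvE G x y) := by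
  intro l
  induction l with
  | nil =>
    intro G _ _ _ _
    exact ⟨rfl, fun j0 => by simp, fun _ _ _ => rfl⟩
  | cons j t ih =>
    intro G hl hnd hG hcols
    have hj : 0 ≤ j ∧ j < (N : Int) := hl j (List.mem_cons_self)
    obtain ⟨d1, d2, d3, d4⟩ := pvDropCol_char m M N hm rm G c j hj.1 (by omega) hG hCM
      (fun i0 hi0 => by
        have := hIffAll i0 j.toNat hi0 (by omega)
        rwa [show ((j.toNat : Nat) : Int) = j by omega] at this)
    rw [List.foldl_cons]
    obtain ⟨t1, t2, t3⟩ := ih (pvDropCol m rm G j)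
      (fun x hx => hl x (List.mem_cons_of_mem _ hx)) (List.Nodup.of_cons hnd)
      (pvGShape_of_mapLen d1 hG)
      (fun x hx => by
        have hxj : x.toNat ≠ j.toNat := by
          have hx' := hl x (List.mem_cons_of_mem _ hx)
          have : x ≠ j := by
            intro hcon
            subst hcon
            exact (List.nodup_cons.mp hnd).1 hx
          omega
        rw [d2 x.toNat hxj, hcols x (List.mem_cons_of_mem _ hx)])
    refine ⟨t1.trans d1, ?_, ?_⟩
    · intro j0
      by_cases hjj : j0 = j.toNat
      · have hnotin : (j0 : Int) ∉ t := by
          rw [show (j0 : Int) = j by omega]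
          exact (List.nodup_cons.mp hnd).1
        rw [t2 j0, if_neg hnotin, if_pos (by rw [show (j0 : Int) = j by omega]; exact List.mem_cons_self)]
        subst hjj
        rw [d3, hcols j List.mem_cons_self]
        rfl
      · rw [t2 j0]
        by_cases hmem : (j0 : Int) ∈ t
        · rw [if_pos hmem, if_pos (List.mem_cons_of_mem _ hmem)]
        · rw [if_neg hmem, if_neg (by
            intro hcon
            rcases List.mem_cons.mp hcon with hcon | hcon
            · exact hjj (by omega)
            · exact hmem hcon), d2 j0 hjj]
    · intro x y hxy
      rw [t3 x y hxy, d4 x y hxy]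

-- grids with equal shape and equal entries are equal
lemma pvGrid_ext (G G' : List (List Int))
    (hlen : G'.map List.length = G.map List.length)
    (hent : ∀ x y : Nat, pvE G' x y = pvE G x y) : G' = G := by
  apply List.ext_getElem
  · have := congrArg List.length hlen
    simpa using this
  · intro x hx hx'
    apply List.ext_getElem
    · have hr := pvRowLen_of_mapLen hlen x
      rw [List.getD_eq_getElem G' [] hx, List.getD_eq_getElem G [] hx'] at hr
      exact hr
    · intro y hy hy'
      have := hent x y
      rw [pvE, pvE, List.getD_eq_getElem G' [] hx, List.getD_eq_getElem G [] hx',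
        List.getD_eq_getElem _ _ hy, List.getD_eq_getElem _ _ hy'] at this
      exact this

lemma pvColL_mem (M y : Nat) (c : List (List Int)) :
    ∀ e ∈ pvColL M y c, ∃ i, i < M ∧ e = pvE c i y := by
  intro e he
  rw [pvColL, List.mem_map] at he
  obtain ⟨r, hr, rfl⟩ := he
  obtain ⟨i, hi, hri⟩ := List.getElem_of_mem hr
  have hiM : i < M := by simp at hi; omega
  have hic : i < c.length := by simp at hi; omega
  refine ⟨i, hiM, ?_⟩
  rw [List.getElem_take] at hri
  rw [pvE, List.getD_eq_getElem c [] hic, hri]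

-- the central fact: A's pull-down gravity equals B's filter-and-pad gravity
lemma pvGrav_eq (m n : Int) (h0m : 0 ≤ m) (h0n : 0 ≤ n)
    (g c : List (List Int)) (rm : PySem.Set (Int × Int))
    (hG : pvGShape m.toNat n.toNat g) (hC : pvCShape m.toNat n.toNat c)
    (h01 : ∀ x y : Nat, x < m.toNat → y < n.toNat → pvE c x y = 0 ∨ pvE c x y = 1)
    (hIffAll : ∀ (i0 j0 : Nat), i0 < m.toNat → j0 < n.toNat →
      (PySem.Set.contains rm (((i0 : Nat) : Int), ((j0 : Nat) : Int)) = true ↔ pvE c i0 j0 = 1)) :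
    pvGravA m n g c = pvGravB m n rm g := by
  have hgM : m.toNat ≤ g.length := hG.1
  have hcM : m.toNat ≤ c.length := hC.1.ge
  obtain ⟨aLen, aCol, aOut⟩ := pvGravA_char m n g c h0m h0n hG hC
  obtain ⟨bLen, bCol, bOut⟩ := pvGravB_fold m m.toNat n.toNat (by omega) rm g c
    hcM hIffAll (PySem.List.pyRange 0 n 1) g
    (fun x hx => by rw [PySem.List.mem_pyRange_one] at hx; omega)
    (PySem.List.nodup_pyRange_one 0 n) hG (fun _ _ => rfl)
  have hBdef : pvGravB m n rm g = (PySem.List.pyRange 0 n 1).foldl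
      (fun G j => pvDropCol m rm G j) g := rfl
  apply pvGrid_ext
  · rw [hBdef, bLen, aLen]
  · intro x y
    by_cases hxy : x < m.toNat ∧ y < n.toNat
    · have hmemy : ((y : Nat) : Int) ∈ PySem.List.pyRange 0 n 1 := by
        rw [PySem.List.mem_pyRange_one]; omega
      have hALen : m.toNat ≤ (pvGravA m n g c).length := by
        have := congrArg List.length aLen
        simp at this
        omega
      have hBLen : m.toNat ≤ (pvGravB m n rm g).length := by
        have := congrArg List.length bLen
        simp at this
        rw [hBdef]
        omega
      rw [← pvColL_getD (M := m.toNat) (j := y) hxy.1 hALen,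
        ← pvColL_getD (M := m.toNat) (j := y) hxy.1 hBLen,
        aCol y hxy.2, hBdef, bCol y, if_pos hmemy]
      have hrun := pvColRun_eq m.toNat (pvColL m.toNat y g) (pvColL m.toNat y c)
        (pvColL_length hgM) (pvColL_length hcM) (by
          intro e he
          obtain ⟨i, hiM, rfl⟩ := pvColL_mem m.toNat y c e he
          exact h01 i y hiM hxy.2)
      rw [hrun]
      rfl
    · rw [aOut x y hxy, hBdef, bOut x y hxy]

-- relation between A's check matrix and B's remove set
def pvRel (m n : Int) (c : List (List Int)) (s : List (Int × Int)) : Prop :=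
  pvCShape m.toNat n.toNat c ∧
  (∀ x y : Nat, x < m.toNat → y < n.toNat → pvE c x y = 0 ∨ pvE c x y = 1) ∧
  s.Nodup ∧
  (∀ p ∈ s, 0 ≤ p.1 ∧ p.1 < m ∧ 0 ≤ p.2 ∧ p.2 < n) ∧
  (∀ x y : Nat, x < m.toNat → y < n.toNat →
    (pvE c x y = 1 ↔ (((x : Nat) : Int), ((y : Nat) : Int)) ∈ s)) ∧
  (c.map List.sum).sum = (s.length : Int)

lemma pvSum_set (l : List Int) : ∀ (i : Nat) (v : Int), i < l.length →
    (l.set i v).sum = l.sum - l.getD i 0 + v := by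
  induction l with
  | nil => intro i v h; simp at h
  | cons a t ih =>
    intro i v h
    cases i with
    | zero => simp; ring
    | succ i =>
      rw [List.set_cons_succ, List.sum_cons, List.sum_cons,
        ih i v (by simpa using h), List.getD_cons_succ]
      ring

lemma pvSum2_setN (c : List (List Int)) (A B : Nat) (v : Int)
    (hA : A < c.length) (hB : B < (c.getD A []).length) :
    ((pvSetN c A B v).map List.sum).sum = (c.map List.sum).sum - pvE c A B + v := by
  unfold pvSetN
  rw [List.modify_eq_set_get _ hA, List.map_set]
  rw [pvSum_set _ A _ (by simpa using hA)]
  have h1 : (c.map List.sum).getD A 0 = (c.getD A []).sum := by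
    rw [List.getD_eq_getElem _ _ (by simpa using hA), List.getElem_map,
      List.getD_eq_getElem c [] hA]
  have h2 : ((c.get ⟨A, hA⟩).set B v).sum = (c.getD A []).sum - (c.getD A []).getD B 0 + v := by
    rw [List.get_eq_getElem, ← List.getD_eq_getElem c [] hA]
    exact pvSum_set _ B v hB
  rw [h1, h2, pvE]
  ring

lemma pvRel_add (m n : Int) (c : List (List Int)) (s : PySem.Set (Int × Int))
    (hrel : pvRel m n c s) (a b : Int)
    (ha : 0 ≤ a) (ham : a < m) (hb : 0 ≤ b) (hbn : b < n) :
    pvRel m n (pvSet c a b 1) (PySem.Set.add s (a, b)) := by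
  obtain ⟨hshape, h01, hnd, hbnd, hiff, hsum⟩ := hrel
  have hA : a.toNat < c.length := by rw [hshape.1]; omega
  have hB : b.toNat < (c.getD a.toNat []).length := by rw [hshape.2 a.toNat (by omega)]; omega
  have hab : (((a.toNat : Nat) : Int), ((b.toNat : Nat) : Int)) = (a, b) := by
    have h1 : ((a.toNat : Nat) : Int) = a := by omega
    have h2 : ((b.toNat : Nat) : Int) = b := by omega
    rw [h1, h2]
  refine ⟨pvCShape_of_mapLen (by rw [pvSet_toNat, pvSetN_mapLen]) hshape, ?_, ?_, ?_, ?_, ?_⟩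
  · intro x y hx hy
    rw [pvSet_toNat]
    by_cases hxy : x = a.toNat ∧ y = b.toNat
    · rw [hxy.1, hxy.2, pvE_setN_eq c _ _ 1 hA hB]
      right; rfl
    · rw [pvE_setN_ne c _ _ 1 x y hxy]
      exact h01 x y hx hy
  · exact PySem.Set.nodup_add s (a, b) hnd
  · intro p hp
    rcases (PySem.Set.mem_add s (a, b) p).mp hp with hp | hp
    · exact hbnd p hp
    · rw [hp]
      exact ⟨ha, ham, hb, hbn⟩
  · intro x y hx hy
    rw [pvSet_toNat]
    by_cases hxy : x = a.toNat ∧ y = b.toNat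
    · rw [hxy.1, hxy.2, pvE_setN_eq c _ _ 1 hA hB]
      simp only [PySem.Set.mem_add]
      constructor
      · intro _
        right
        exact hab
      · intro _
        trivial
    · rw [pvE_setN_ne c _ _ 1 x y hxy, hiff x y hx hy]
      simp only [PySem.Set.mem_add]
      constructor
      · exact fun h => Or.inl h
      · intro h
        rcases h with h | h
        · exact h
        · exfalso
          have : x = a.toNat ∧ y = b.toNat := by
            have h1 := congrArg Prod.fst h
            have h2 := congrArg Prod.snd h
            simp at h1 h2
            omega
          exact hxy this
  · rw [pvSet_toNat, pvSum2_setN c a.toNat b.toNat 1 hA hB]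
    by_cases hmem : (a, b) ∈ s
    · have h1 : pvE c a.toNat b.toNat = 1 := by
        rw [hiff a.toNat b.toNat (by omega) (by omega), hab]
        exact hmem
      rw [h1, PySem.Set.add_of_mem hmem, hsum]
      ring
    · have h0 : pvE c a.toNat b.toNat = 0 := by
        rcases h01 a.toNat b.toNat (by omega) (by omega) with h | h
        · exact h
        · exfalso
          rw [hiff a.toNat b.toNat (by omega) (by omega), hab] at h
          exact hmem h
      rw [h0, PySem.Set.add_of_not_mem hmem, hsum]
      simp

lemma pvRel_mark (m n : Int) (g c : List (List Int)) (s : PySem.Set (Int × Int))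
    (i j : Int) (hrel : pvRel m n c s)
    (hi : 0 ≤ i) (him : i < m - 1) (hj : 0 ≤ j) (hjn : j < n - 1) :
    pvRel m n (pvMarkA g c i j) (pvMarkB g s i j) := by
  unfold pvMarkA pvMarkB
  dsimp only
  by_cases hcond : pvGet g i j ≠ 0 ∧ pvGet g i j = pvGet g i (j+1) ∧
      pvGet g i (j+1) = pvGet g (i+1) j ∧ pvGet g (i+1) j = pvGet g (i+1) (j+1)
  · rw [if_pos hcond, if_pos hcond]
    exact pvRel_add m n _ _
      (pvRel_add m n _ _
        (pvRel_add m n _ _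
          (pvRel_add m n c s hrel i j hi (by omega) hj (by omega))
          i (j+1) hi (by omega) (by omega) (by omega))
        (i+1) j (by omega) (by omega) hj (by omega))
      (i+1) (j+1) (by omega) (by omega) (by omega) (by omega)
  · rw [if_neg hcond, if_neg hcond]
    exact hrel

lemma pvFold_rel {α β γ : Type} (R : β → γ → Prop) (P : α → Prop)
    (f : β → α → β) (h : γ → α → γ)
    (hstep : ∀ x, P x → ∀ b cc, R b cc → R (f b x) (h cc x)) :
    ∀ (l : List α) (b : β) (cc : γ), (∀ x ∈ l, P x) → R b cc →
      R (l.foldl f b) (l.foldl h cc) := by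
  intro l
  induction l with
  | nil => intro b cc _ hr; exact hr
  | cons x t ih =>
    intro b cc hl hr
    rw [List.foldl_cons, List.foldl_cons]
    exact ih (f b x) (h cc x) (fun y hy => hl y (List.mem_cons_of_mem _ hy))
      (hstep x (hl x List.mem_cons_self) b cc hr)

lemma pvRel_init (m n : Int) :
    pvRel m n
      ((PySem.List.pyRange 0 m 1).map (fun _ => (PySem.List.pyRange 0 n 1).map (fun _ => (0:Int))))
      PySem.Set.empty := by
  have hrow : ∀ a : Nat, a < m.toNat →
      (((PySem.List.pyRange 0 m 1).map (fun _ => (PySem.List.pyRange 0 n 1).map (fun _ => (0:Int)))).getD a []) =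
        (PySem.List.pyRange 0 n 1).map (fun _ => (0:Int)) := by
    intro a ha
    rw [List.getD_eq_getElem _ _ (by rw [List.length_map, PySem.List.length_pyRange_one]; omega),
      List.getElem_map]
  have hlen : ((PySem.List.pyRange 0 m 1).map (fun _ => (PySem.List.pyRange 0 n 1).map (fun _ => (0:Int)))).length = m.toNat := by
    rw [List.length_map, PySem.List.length_pyRange_one]
    omega
  have hent : ∀ x y : Nat, x < m.toNat →
      pvE ((PySem.List.pyRange 0 m 1).map (fun _ => (PySem.List.pyRange 0 n 1).map (fun _ => (0:Int)))) x y = 0 := by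
    intro x y hx
    rw [pvE, hrow x hx]
    by_cases hy : y < n.toNat
    · rw [List.getD_eq_getElem _ _ (by rw [List.length_map, PySem.List.length_pyRange_one]; omega),
        List.getElem_map]
    · rw [List.getD_eq_default _ _ (by rw [List.length_map, PySem.List.length_pyRange_one]; omega)]
  refine ⟨⟨hlen, ?_⟩, ?_, List.nodup_nil, by simp [PySem.Set.empty], ?_, ?_⟩
  · intro a ha
    rw [hrow a ha, List.length_map, PySem.List.length_pyRange_one]
    omega
  · intro x y hx _
    left
    exact hent x y hx
  · intro x y hx hy
    rw [hent x y hx]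
    simp [PySem.Set.empty]
  · rw [List.sum_eq_zero, PySem.Set.empty]
    · simp
    · intro x hx
      rw [List.mem_map] at hx
      obtain ⟨r, hr, rfl⟩ := hx
      rw [List.mem_map] at hr
      obtain ⟨_, _, rfl⟩ := hr
      rw [List.sum_eq_zero]
      intro z hz
      rw [List.mem_map] at hz
      obtain ⟨_, _, rfl⟩ := hz
      rfl

lemma pvDetect_rel (m n : Int) (g : List (List Int)) :
    pvRel m n (pvCheckA m n g) (pvRemoveB m n g) := by
  unfold pvCheckA pvRemoveB
  exact pvFold_rel (pvRel m n) (fun i => 0 ≤ i ∧ i < m - 1) _ _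
    (fun i hi c s hr =>
      pvFold_rel (pvRel m n) (fun j => 0 ≤ j ∧ j < n - 1) _ _
        (fun j hj c' s' hr' => pvRel_mark m n g c' s' i j hr' hi.1 hi.2 hj.1 hj.2)
        (PySem.List.pyRange 0 (n-1) 1) c s
        (fun x hx => by rw [PySem.List.mem_pyRange_one] at hx; omega) hr)
    (PySem.List.pyRange 0 (m-1) 1) _ _
    (fun x hx => by rw [PySem.List.mem_pyRange_one] at hx; omega)
    (pvRel_init m n)

lemma pvList_recon (c : List (List Int)) :
    (List.range c.length).map (fun k => c.getD k []) = c := by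
  apply List.ext_getElem
  · simp
  · intro t h1 h2
    simp only [List.getElem_map, List.getElem_range]
    rw [List.getD_eq_getElem c [] h2]

lemma pvCountA_eq (m : Int) (c : List (List Int)) (hlen : c.length = m.toNat) :
    pvCountA m c = (c.map List.sum).sum := by
  unfold pvCountA
  rw [PySem.List.foldl_add, PySem.List.pyRange_zero, List.map_map]
  have hfun : ((fun i => (c.getD i.toNat []).sum) ∘ (fun (k : Nat) => (k : Int))) =
      fun (k : Nat) => (c.getD k []).sum := by
    funext k
    simp
  rw [hfun, ← hlen]
  have : (List.range c.length).map (fun k => (c.getD k []).sum) =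
      ((List.range c.length).map (fun k => c.getD k [])).map List.sum := by
    rw [List.map_map]
    rfl
  rw [this, pvList_recon]
  ring

lemma pvRemoveB_deg (m n : Int) (hdeg : m ≤ 1 ∨ n ≤ 1) (g : List (List Int)) :
    pvRemoveB m n g = [] := by
  unfold pvRemoveB
  rcases hdeg with h | h
  · rw [PySem.List.pyRange_one_eq_nil (by omega : m - 1 ≤ 0)]
    rfl
  · have hn : PySem.List.pyRange 0 (n-1) 1 = [] := PySem.List.pyRange_one_eq_nil (by omega)
    simp only [hn, List.foldl_nil]
    rw [PySem.List.foldl_ignore]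
    rfl

lemma pvLoop_eq (m n : Int) (h0m : 0 ≤ m) (h0n : 0 ≤ n) :
    ∀ (fuel : Nat) (g : List (List Int)) (ans : Int),
      pvGShape m.toNat n.toNat g → pvLoopA m n fuel g ans = pvLoopB m n fuel g ans := by
  intro fuel
  induction fuel with
  | zero => intro g ans _; rfl
  | succ f ih =>
    intro g ans hG
    obtain ⟨hshape, h01, hnd, hbnd, hiff, hsum⟩ := pvDetect_rel m n g
    have hcnt : pvCountA m (pvCheckA m n g) = ((pvRemoveB m n g).length : Int) := by
      rw [pvCountA_eq m _ hshape.1, hsum]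
    rw [pvLoopA, pvLoopB]
    by_cases hz : (pvRemoveB m n g).length = 0
    · rw [if_pos (by rw [hcnt, hz]; rfl), if_pos hz]
    · have hIffAll : ∀ (i0 j0 : Nat), i0 < m.toNat → j0 < n.toNat →
          (PySem.Set.contains (pvRemoveB m n g) (((i0 : Nat) : Int), ((j0 : Nat) : Int)) = true ↔
            pvE (pvCheckA m n g) i0 j0 = 1) := by
        intro i0 j0 hi hj
        rw [PySem.Set.contains_iff]
        exact (hiff i0 j0 hi hj).symm
      have hGrav := pvGrav_eq m n h0m h0n g (pvCheckA m n g) (pvRemoveB m n g)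
        hG hshape h01 hIffAll
      have hshape' : pvGShape m.toNat n.toNat (pvGravB m n (pvRemoveB m n g) g) := by
        rw [← hGrav]
        exact pvGShape_of_mapLen (pvGravA_char m n g (pvCheckA m n g) h0m h0n hG hshape).1 hG
      rw [if_neg (by rw [hcnt]; exact_mod_cast hz), if_neg hz, hGrav, hcnt]
      exact ih _ _ hshape'

-- ===== VERDICT (by name: the statement is the Claim_ definition above) =====
theorem solution_spec : Claim_equal_solution := by
  intro m n board hDom hPre
  unfold Spec_solution solution solution_alt
  by_cases hdeg : m ≤ 1 ∨ n ≤ 1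
  · -- degenerate board: no 2x2 block exists, both loops stop at once with 0
    obtain ⟨hshape, _, _, _, _, hsum⟩ := pvDetect_rel m n (pvToGrid board)
    have hrem : pvRemoveB m n (pvToGrid board) = [] := pvRemoveB_deg m n hdeg _
    have hcnt0 : pvCountA m (pvCheckA m n (pvToGrid board)) = 0 := by
      rw [pvCountA_eq m _ hshape.1, hsum, hrem]
      rfl
    rw [pvLoopA, pvLoopB]
    rw [if_pos hcnt0, if_pos (by rw [hrem]; rfl)]
  · have h2m : 2 ≤ m := by omega
    have h2n : 2 ≤ n := by omega
    rcases hPre with h | h | ⟨hmb, hrows⟩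
    · omega
    · omega
    apply pvLoop_eq m n (by omega) (by omega)
    constructor
    · rw [pvToGrid, List.length_map]
      omega
    · intro a ha
      have hab : a < board.length := by omega
      have hmem : board[a] ∈ board.take m.toNat := by
        have : (board.take m.toNat)[a]'(by simp; omega) = board[a] := List.getElem_take
        rw [← this]
        exact List.getElem_mem _
      have hlen := hrows board[a] hmem
      rw [PySem.Str.len_eq] at hlen
      rw [pvToGrid, List.getD_eq_getElem _ [] (by rw [List.length_map]; omega),
        List.getElem_map, List.length_map]
      omega
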